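-- pv_equiv track=rewrite | github.com/shubhodh/DSA-Daily | 2433. Find The Original Array of Prefix Xor.py | findArray
-- ===== SOURCE A (Python) =====
-- from typing import List
--
-- def findArray(pref: List[int]) -> List[int]:
--     pr = [pref[0]]
--     y=0
--     for i in range(1,len(pref)):
--         y = y^pr[i-1]
--         x = y^pref[i]
--         pr.append(x)
--     return pr
-- ===== SOURCE B (Python) =====
-- from typing import List
--
-- def findArray(pref: List[int]) -> List[int]:
--     # each element is just the XOR of two adjacent prefix values; no running state
--     return [pref[0]] + [a ^ b for a, b in zip(pref, pref[1:])]
-- ===== Notes on version B (the rewrite author's own statement) =====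
-- stated objective: simpler
-- what changed: Drops A's running accumulator y and the self-referential append loop (which re-reads the output list pr[i-1] to reconstruct pref[i-1]); B computes each element directly as the XOR of adjacent input elements via zip(pref, pref[1:]).
import Mathlib
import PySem

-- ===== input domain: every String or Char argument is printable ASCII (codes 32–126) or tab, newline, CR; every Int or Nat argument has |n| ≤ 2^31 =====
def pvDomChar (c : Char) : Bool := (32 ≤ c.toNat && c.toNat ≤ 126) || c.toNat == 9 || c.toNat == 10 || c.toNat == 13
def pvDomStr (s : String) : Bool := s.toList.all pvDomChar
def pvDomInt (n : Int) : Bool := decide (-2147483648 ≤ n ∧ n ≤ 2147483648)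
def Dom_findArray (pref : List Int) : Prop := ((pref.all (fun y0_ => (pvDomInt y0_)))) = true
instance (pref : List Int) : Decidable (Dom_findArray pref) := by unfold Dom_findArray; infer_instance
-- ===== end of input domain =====

-- B drops A's running accumulator y (which re-reads the output list to reconstruct pref[i-1])
-- and computes each element directly as the XOR of adjacent input elements: simpler, same O(n) cost.


-- ===== PORT A =====
-- loop body: y = y ^ pr[i-1]; x = y ^ pref[i]; pr.append(x)
-- pyGet? … .getD 0: the index is always in range under Pre_ (pr has i elements at step i), so the
-- default is never taken; the empty list, where reading the first element raises, is excluded by Pre_.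
def findArrayStep (pref : List Int) (st : List Int × Int) (i : Int) : List Int × Int :=
  let y := PySem.Int.bxor st.2 ((PySem.List.pyGet? st.1 (i - 1)).getD 0)
  let x := PySem.Int.bxor y ((PySem.List.pyGet? pref i).getD 0)
  (st.1 ++ [x], y)

def findArray (pref : List Int) : List Int :=
  ((PySem.List.pyRange 1 (pref.length : Int) 1).foldl (findArrayStep pref)
    ([(PySem.List.pyGet? pref 0).getD 0], 0)).1

-- ===== PORT B =====
-- [pref[0]] + [a ^ b for a, b in zip(pref, pref[1:])]
def findArray_alt (pref : List Int) : List Int :=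
  (PySem.List.pyGet? pref 0).getD 0 ::
    (pref.zip (PySem.List.slice pref (some 1) none)).map (fun ab => PySem.Int.bxor ab.1 ab.2)

-- ===== PRECONDITION & SPEC =====
-- Both programs read the first element, which raises IndexError on the empty list; Pre_ excludes it.
def Pre_findArray (pref : List Int) : Prop := pref ≠ []
instance (pref : List Int) : Decidable (Pre_findArray pref) := by unfold Pre_findArray; infer_instance
def pvWitness_findArray : List Int := [5, 2, 0, 3, 1]

def Spec_findArray (pref : List Int) (out : List Int) : Prop := out = findArray_alt pref
instance (pref : List Int) (out : List Int) : Decidable (Spec_findArray pref out) := by unfold Spec_findArray; infer_instance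

-- ===== CLAIM (what is proved, stated in full; the proofs are below) =====
def Claim_equal_findArray : Prop := ∀ (pref : List Int), Dom_findArray pref → Pre_findArray pref → Spec_findArray pref (findArray pref)

-- ===== LEMMAS AND PROOFS =====

theorem bxor_eq_xor (a b : Int) : PySem.Int.bxor a b = Int.xor a b := by
  unfold PySem.Int.bxor
  rcases a with a | a <;> rcases b with b | b <;> simp [Int.xor, Int.negSucc_eq] <;> omega

theorem bxor_cancel (a b : Int) : PySem.Int.bxor a (PySem.Int.bxor a b) = b := by
  simp only [bxor_eq_xor]
  rcases a with a | a <;> rcases b with b | b <;> simp [Int.xor]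

theorem map_zip_eq_zipWith (f : Int → Int → Int) (as bs : List Int) :
    (as.zip bs).map (fun ab => f ab.1 ab.2) = List.zipWith f as bs := by
  induction as generalizing bs with
  | nil => simp
  | cons a as ih => cases bs <;> simp [List.zip_cons_cons, ih]

theorem alt_cons (p : Int) (rest : List Int) :
    findArray_alt (p :: rest) = p :: List.zipWith PySem.Int.bxor (p :: rest) rest := by
  simp [findArray_alt, PySem.List.slice_from_one, map_zip_eq_zipWith]

theorem alt_length (p : Int) (rest : List Int) :
    (findArray_alt (p :: rest)).length = rest.length + 1 := by
  simp [alt_cons]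

theorem alt_getD_zero (p : Int) (rest : List Int) :
    (findArray_alt (p :: rest)).getD 0 0 = p := by
  rw [alt_cons]; rfl

theorem alt_getD_succ (p : Int) (rest : List Int) (k : Nat) (hk : k < rest.length) :
    (findArray_alt (p :: rest)).getD (k + 1) 0
      = PySem.Int.bxor ((p :: rest).getD k 0) ((p :: rest).getD (k + 1) 0) := by
  have hk' : k < (p :: rest).length := by simp; omega
  have hz : k < (List.zipWith PySem.Int.bxor (p :: rest) rest).length := by
    simp [List.length_zipWith]; omega
  have e1 : (p :: rest).getD k 0 = (p :: rest)[k] := List.getD_eq_getElem _ _ hk'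
  have e2 : (p :: rest).getD (k + 1) 0 = rest.getD k 0 := List.getD_cons_succ
  rw [alt_cons, List.getD_cons_succ, List.getD_eq_getElem _ _ hz, List.getElem_zipWith,
      e1, e2, List.getD_eq_getElem _ _ hk]

theorem invA (p : Int) (rest : List Int) (m : Nat) (hm : m ≤ rest.length) :
    ((List.range m).map (fun k : Nat => (1 : Int) + (k : Int))).foldl (findArrayStep (p :: rest)) ([p], 0)
      = ((findArray_alt (p :: rest)).take (m + 1),
         if m = 0 then 0 else (p :: rest).getD (m - 1) 0) := by
  induction m with
  | zero => simp [alt_cons]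
  | succ m ih =>
    have hm' : m ≤ rest.length := Nat.le_of_succ_le hm
    have hmlt : m < rest.length := hm
    rw [List.range_succ, List.map_append, List.foldl_append, ih hm']
    have haltlen : (findArray_alt (p :: rest)).length = rest.length + 1 := alt_length p rest
    -- the element read back at step i = 1 + m is pr[i-1] = alt[m]
    have hidx : ((1 : Int) + (m : Int)) - 1 = (m : Int) := by ring
    have hgetpr : (PySem.List.pyGet? ((findArray_alt (p :: rest)).take (m + 1)) ((1 : Int) + (m : Int) - 1)).getD 0
        = (findArray_alt (p :: rest)).getD m 0 := by
      rw [hidx, PySem.List.pyGet?_natCast, List.getElem?_take_of_lt (by omega)]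
      simp [List.getD_eq_getElem?_getD]
    have hcast : (1 : Int) + (m : Int) = ((m + 1 : Nat) : Int) := by push_cast; ring
    have hgetpref : (PySem.List.pyGet? (p :: rest) ((1 : Int) + (m : Int))).getD 0
        = (p :: rest).getD (m + 1) 0 := by
      rw [hcast, PySem.List.pyGet?_natCast]
      simp [List.getD_eq_getElem?_getD]
    -- the new accumulator value equals pref[m]
    have hy : PySem.Int.bxor (if m = 0 then 0 else (p :: rest).getD (m - 1) 0)
        ((findArray_alt (p :: rest)).getD m 0) = (p :: rest).getD m 0 := by
      rcases m with _ | k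
      · rw [alt_getD_zero, if_pos rfl, PySem.Int.bxor_comm]
        simp
      · rw [alt_getD_succ p rest k (by omega), if_neg (Nat.succ_ne_zero k)]
        simpa using bxor_cancel ((p :: rest).getD k 0) ((p :: rest).getD (k + 1) 0)
    have haltm1 : (findArray_alt (p :: rest)).getD (m + 1) 0
        = PySem.Int.bxor ((p :: rest).getD m 0) ((p :: rest).getD (m + 1) 0) :=
      alt_getD_succ p rest m hmlt
    have htake : (findArray_alt (p :: rest)).take (m + 1) ++ [(findArray_alt (p :: rest)).getD (m + 1) 0]
        = (findArray_alt (p :: rest)).take (m + 2) := by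
      have h1 : m + 1 < (findArray_alt (p :: rest)).length := by omega
      rw [List.getD_eq_getElem _ _ h1, ← List.concat_eq_append]
      exact List.take_concat_get h1
    simp only [List.map_cons, List.map_nil, List.foldl_cons, List.foldl_nil, findArrayStep, hgetpr, hgetpref, hy]
    rw [← haltm1, htake]
    simp

-- ===== VERDICT (by name: the statement is the Claim_ definition above) =====
theorem findArray_spec : Claim_equal_findArray := by
  intro pref _ hpre
  unfold Spec_findArray
  obtain ⟨p, rest, rfl⟩ := List.exists_cons_of_ne_nil hpre
  unfold findArray
  have hlen : ((p :: rest).length : Int) = (rest.length : Int) + 1 := by simp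
  rw [hlen, PySem.List.pyRange_one]
  have h1 : (((rest.length : Int) + 1) - 1).toNat = rest.length := by omega
  rw [h1]
  have hinit : (PySem.List.pyGet? (p :: rest) 0).getD 0 = p := by simp
  have hlen2 := alt_length p rest
  rw [hinit, invA p rest rest.length le_rfl, ← hlen2]
  simp
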